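-- pv_equiv track=rewrite | github.com/corgilee/Implementation | mianjin/robinhood_house_trades.py | exact_match
-- ===== SOURCE A (Python) =====
-- from collections import defaultdict
--
-- def exact_match(house_trades,street_trades):
--     house_dict=defaultdict(int)
--     trade_dict=defaultdict(int)
--     for trade in house_trades:
--         house_dict[trade]+=1
--
--     for trade in street_trades:
--         trade_dict[trade]+=1
--         if house_dict[trade]>=1:
--             house_dict[trade]-=1
--             trade_dict[trade]-=1
--
--     res=[]
--     new_house_list=[]
--     new_trade_list=[]
--     for key,val in house_dict.items():
--         if val>0:
--             cur=[key]*abs(val)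
--             res+=cur
--             new_house_list+=cur
--
--     for key,val in trade_dict.items():
--         if val>0:
--             cur=[key]*abs(val)
--             res+=cur
--             new_trade_list+=cur
--
--     res.sort()
--
--     return res,new_house_list,new_trade_list
-- ===== SOURCE B (Python) =====
-- def exact_match(house_trades, street_trades):
--     # Cancel matches by merging the two sorted lists with two pointers; the
--     # survivors of the merge carry each key's leftover multiplicity, and the
--     # per-list outputs are rebuilt in first-appearance key order.
--     hs = sorted(house_trades)
--     ss = sorted(street_trades)
--     left_h, left_s = [], []
--     i = j = 0
--     while i < len(hs) and j < len(ss):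
--         if hs[i] == ss[j]:
--             i += 1
--             j += 1
--         elif hs[i] < ss[j]:
--             left_h.append(hs[i])
--             i += 1
--         else:
--             left_s.append(ss[j])
--             j += 1
--     left_h.extend(hs[i:])
--     left_s.extend(ss[j:])
--     mult_h = {}
--     for t in left_h:
--         mult_h[t] = mult_h.get(t, 0) + 1
--     mult_s = {}
--     for t in left_s:
--         mult_s[t] = mult_s.get(t, 0) + 1
--     new_house_list = [k for k in dict.fromkeys(house_trades) for _ in range(mult_h.get(k, 0))]
--     new_trade_list = [k for k in dict.fromkeys(street_trades) for _ in range(mult_s.get(k, 0))]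
--     return sorted(new_house_list + new_trade_list), new_house_list, new_trade_list
-- ===== Notes on version B (the rewrite author's own statement) =====
-- stated objective: alternative
-- what changed: Replaces A's hash-counting with interleaved per-occurrence cancellation by sorting both lists and cancelling matches with a two-pointer merge; the merge survivors give each key's leftover multiplicity and the per-list outputs are rebuilt in first-appearance key order.
import Mathlib
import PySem

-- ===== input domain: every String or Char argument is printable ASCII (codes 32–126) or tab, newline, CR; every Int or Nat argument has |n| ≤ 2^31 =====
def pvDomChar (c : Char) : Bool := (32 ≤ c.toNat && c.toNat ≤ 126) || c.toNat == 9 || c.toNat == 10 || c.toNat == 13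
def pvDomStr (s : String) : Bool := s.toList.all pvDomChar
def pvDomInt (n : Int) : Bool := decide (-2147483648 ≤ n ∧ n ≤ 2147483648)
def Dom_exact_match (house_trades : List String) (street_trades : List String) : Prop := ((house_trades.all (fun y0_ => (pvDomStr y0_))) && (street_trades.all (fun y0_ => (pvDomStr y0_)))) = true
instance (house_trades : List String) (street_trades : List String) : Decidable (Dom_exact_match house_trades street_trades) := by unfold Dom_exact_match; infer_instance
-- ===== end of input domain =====

-- B cancels matches by sorting both lists and merging with two pointers instead of A's interleaved defaultdict cancellation, rebuilding the per-list outputs in first-appearance key order; objective: alternative.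


-- ===== PORT A =====
-- one street iteration: trade_dict[trade] += 1; reading house_dict[trade] on a
-- defaultdict inserts the default 0 (modelled by setdefault); then the conditional
-- cancellation decrements both entries.
def pvStreetStep (s : PySem.Dict String Int × PySem.Dict String Int) (t : String) :
    PySem.Dict String Int × PySem.Dict String Int :=
  let td := s.2.modify t 0 (· + 1)
  let hd := s.1.setdefault t 0
  if 1 ≤ hd.getD t 0 then (hd.modify t 0 (· - 1), td.modify t 0 (· - 1))
  else (hd, td)

-- one output iteration of A's result loops: `cur = [key]*abs(val)` appended to two lists
def pvOutStep (s : List String × List String) (kv : String × Int) :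
    List String × List String :=
  if 0 < kv.2 then (s.1 ++ List.replicate kv.2.natAbs kv.1, s.2 ++ List.replicate kv.2.natAbs kv.1)
  else s

def exact_match (house_trades : List String) (street_trades : List String) :
    List String × List String × List String :=
  let house_dict := house_trades.foldl (fun d t => d.modify t 0 (· + 1)) PySem.Dict.empty
  let st := street_trades.foldl pvStreetStep (house_dict, PySem.Dict.empty)
  let p1 := st.1.items.foldl pvOutStep ([], [])
  let p2 := st.2.items.foldl pvOutStep (p1.1, [])
  (PySem.List.sorted p2.1 (fun x => x), p1.2, p2.2)

-- ===== PORT B =====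
-- the two-pointer while-loop of Source B over the two sorted lists, as the obvious
-- structural recursion on the remaining suffixes; the trailing `extend`s are the
-- two base cases. Returns (left_h, left_s); the multiplicity loops are the foldl's below.
def pvMerge : List String → List String → List String × List String
  | [], ss => ([], ss)
  | h :: hs, [] => (h :: hs, [])
  | h :: hs, s :: ss =>
      if h = s then pvMerge hs ss
      else if h < s then
        let p := pvMerge hs (s :: ss)
        (h :: p.1, p.2)
      else
        let p := pvMerge (h :: hs) ss
        (p.1, s :: p.2)
  termination_by hs ss => hs.length + ss.length

def exact_match_alt (house_trades : List String) (street_trades : List String) :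
    List String × List String × List String :=
  let hs := PySem.List.sorted house_trades (fun x => x)
  let ss := PySem.List.sorted street_trades (fun x => x)
  let p := pvMerge hs ss
  let mult_h := p.1.foldl (fun d t => d.insert t (d.getD t 0 + 1)) (PySem.Dict.empty : PySem.Dict String Int)
  let mult_s := p.2.foldl (fun d t => d.insert t (d.getD t 0 + 1)) (PySem.Dict.empty : PySem.Dict String Int)
  let new_house_list := (PySem.List.dedup house_trades).flatMap
    (fun k => List.replicate (mult_h.getD k 0).toNat k)
  let new_trade_list := (PySem.List.dedup street_trades).flatMap
    (fun k => List.replicate (mult_s.getD k 0).toNat k)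
  (PySem.List.sorted (new_house_list ++ new_trade_list) (fun x => x), new_house_list, new_trade_list)

-- ===== PRECONDITION & SPEC =====
def Spec_exact_match (house_trades : List String) (street_trades : List String) (out : List String × List String × List String) : Prop := out = exact_match_alt house_trades street_trades
instance (house_trades : List String) (street_trades : List String) (out : List String × List String × List String) : Decidable (Spec_exact_match house_trades street_trades out) := by unfold Spec_exact_match; infer_instance

-- ===== CLAIM (what is proved, stated in full; the proofs are below) =====
def Claim_equal_exact_match : Prop := ∀ (house_trades : List String) (street_trades : List String), Dom_exact_match house_trades street_trades → Spec_exact_match house_trades street_trades (exact_match house_trades street_trades)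

-- ===== LEMMAS AND PROOFS =====

-- per-key contribution of A's output loops
def pvContrib (items : List (String × Int)) : List String :=
  items.flatMap (fun kv => if 0 < kv.2 then List.replicate kv.2.natAbs kv.1 else [])

-- A's output loop appends the same contribution to both components of its pair state
theorem pvOutFold (items : List (String × Int)) (r m : List String) :
    items.foldl pvOutStep (r, m) = (r ++ pvContrib items, m ++ pvContrib items) := by
  induction items generalizing r m with
  | nil => simp [pvContrib]
  | cons kv tl ih =>
    simp only [List.foldl_cons, pvOutStep, pvContrib, List.flatMap_cons]
    split
    · rw [ih]; simp [pvContrib]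
    · rw [ih]; simp [pvContrib]

-- keys after one street iteration
theorem pvStreetStep_keys (hd td : PySem.Dict String Int) (t : String) :
    (pvStreetStep (hd, td) t).1.keys = PySem.Set.add hd.keys t
    ∧ (pvStreetStep (hd, td) t).2.keys = PySem.Set.add td.keys t := by
  have hsd : (hd.setdefault t 0).keys = PySem.Set.add hd.keys t := by
    rw [PySem.Dict.keys_setdefault]
    by_cases hm : t ∈ hd.keys
    · simp [PySem.Set.add, hm, (PySem.Dict.contains_iff_mem_keys hd t).mpr hm]
    · have : hd.contains t = false := by
        rw [← Bool.not_eq_true]; exact fun h => hm ((PySem.Dict.contains_iff_mem_keys hd t).mp h)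
      simp [PySem.Set.add, hm, this]
  have htd : (td.modify t 0 (· + 1)).keys = PySem.Set.add td.keys t := by
    rw [PySem.Dict.keys_modify]
    by_cases hm : t ∈ td.keys
    · rw [PySem.Dict.keys_insert_of_contains _ _ ((PySem.Dict.contains_iff_mem_keys td t).mpr hm)]
      simp [PySem.Set.add, hm]
    · have : td.contains t = false := by
        rw [← Bool.not_eq_true]; exact fun h => hm ((PySem.Dict.contains_iff_mem_keys td t).mp h)
      rw [PySem.Dict.keys_insert_of_not_contains _ _ this]
      simp [PySem.Set.add, hm]
  unfold pvStreetStep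
  dsimp only
  split
  · constructor
    · rw [PySem.Dict.keys_modify,
        PySem.Dict.keys_insert_of_contains _ _ (by simp [PySem.Dict.contains_setdefault]), hsd]
    · rw [PySem.Dict.keys_modify,
        PySem.Dict.keys_insert_of_contains _ _ (by
          rw [PySem.Dict.contains_iff_mem_keys, htd]
          exact (PySem.Set.mem_add _ _ _).mpr (Or.inr rfl)), htd]
  · exact ⟨hsd, htd⟩

-- values after the street loop: per-occurrence cancellation equals counter subtraction
theorem pvStreetFold_getD (l : List String) (hd td : PySem.Dict String Int)
    (H : ∀ j, 0 ≤ hd.getD j 0) (k : String) :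
    ((l.foldl pvStreetStep (hd, td)).1.getD k 0 = max 0 (hd.getD k 0 - l.count k))
    ∧ ((l.foldl pvStreetStep (hd, td)).2.getD k 0 = td.getD k 0 + max 0 ((l.count k : Int) - hd.getD k 0)) := by
  induction l generalizing hd td with
  | nil =>
    have := H k
    constructor
    · simp; omega
    · simp; omega
  | cons t tl ih =>
    have hcond : (hd.setdefault t 0).getD t 0 = hd.getD t 0 :=
      PySem.Dict.getD_setdefault_self hd t 0 0
    have hA : ∀ j, (pvStreetStep (hd, td) t).1.getD j 0 =
        if j = t then (if 1 ≤ hd.getD t 0 then hd.getD t 0 - 1 else hd.getD t 0)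
        else hd.getD j 0 := by
      intro j
      unfold pvStreetStep; dsimp only
      rw [hcond]
      by_cases hc : 1 ≤ hd.getD t 0
      · rw [if_pos hc]
        by_cases hj : j = t
        · subst hj
          simp [PySem.Dict.modify, PySem.Dict.getD_insert_self, hcond, hc]
        · simp only [PySem.Dict.modify, hj]
          rw [PySem.Dict.getD_insert_of_ne _ _ _ hj]
          simp [PySem.Dict.getD, PySem.Dict.get?_setdefault_of_ne _ _ hj]
      · rw [if_neg hc]
        by_cases hj : j = t
        · subst hj; simp [hcond, hc]
        · simp only [if_neg hj]
          simp [PySem.Dict.getD, PySem.Dict.get?_setdefault_of_ne _ _ hj]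
    have hB : ∀ j, (pvStreetStep (hd, td) t).2.getD j 0 =
        if j = t then (if 1 ≤ hd.getD t 0 then td.getD t 0 else td.getD t 0 + 1)
        else td.getD j 0 := by
      intro j
      unfold pvStreetStep; dsimp only
      rw [hcond]
      by_cases hc : 1 ≤ hd.getD t 0
      · rw [if_pos hc]
        by_cases hj : j = t
        · subst hj
          simp [PySem.Dict.modify, PySem.Dict.getD_insert_self, hc]
        · simp only [PySem.Dict.modify, if_neg hj]
          rw [PySem.Dict.getD_insert_of_ne _ _ _ hj, PySem.Dict.getD_insert_of_ne _ _ _ hj]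
      · rw [if_neg hc]
        by_cases hj : j = t
        · subst hj; simp [PySem.Dict.modify, PySem.Dict.getD_insert_self, hc]
        · simp only [if_neg hj, PySem.Dict.modify]
          rw [PySem.Dict.getD_insert_of_ne _ _ _ hj]
    have H' : ∀ j, 0 ≤ (pvStreetStep (hd, td) t).1.getD j 0 := by
      intro j; rw [hA j]
      have := H j; have := H t
      split_ifs <;> omega
    have hfold : (t :: tl).foldl pvStreetStep (hd, td)
        = tl.foldl pvStreetStep ((pvStreetStep (hd, td) t).1, (pvStreetStep (hd, td) t).2) := by
      simp
    rcases ih (pvStreetStep (hd, td) t).1 (pvStreetStep (hd, td) t).2 H' with ⟨h1, h2⟩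
    rw [hfold]
    constructor
    · rw [h1, hA k]
      have hcnt : ((t :: tl).count k : Int) = (tl.count k : Int) + (if k = t then 1 else 0) := by
        rcases eq_or_ne k t with h|h
        · subst h; simp
        · simp [h, Ne.symm h]
      rw [hcnt]
      have := H k; have := H t
      by_cases hj : k = t
      · subst hj; split_ifs <;> omega
      · simp [hj]
    · rw [h2, hB k, hA k]
      have hcnt : ((t :: tl).count k : Int) = (tl.count k : Int) + (if k = t then 1 else 0) := by
        rcases eq_or_ne k t with h|h
        · subst h; simp
        · simp [h, Ne.symm h]
      rw [hcnt]
      have := H k; have := H t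
      by_cases hj : k = t
      · subst hj; split_ifs <;> omega
      · simp [hj]

-- keys after the street loop
theorem pvStreetFold_keys (l : List String) (hd td : PySem.Dict String Int) :
    ((l.foldl pvStreetStep (hd, td)).1.keys = PySem.Set.update hd.keys l)
    ∧ ((l.foldl pvStreetStep (hd, td)).2.keys = PySem.Set.update td.keys l) := by
  induction l generalizing hd td with
  | nil => exact ⟨rfl, rfl⟩
  | cons t tl ih =>
    have hk := pvStreetStep_keys hd td t
    have := ih (pvStreetStep (hd, td) t).1 (pvStreetStep (hd, td) t).2
    simp only [List.foldl_cons, PySem.Set.update, List.foldl_cons] at *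
    rw [← hk.1, ← hk.2]
    exact this

-- keys added by the street loop carry zero surplus, so they drop out of the flatMap
theorem pvFlatMap_update (f : String → List String) (l : List String) (A : PySem.Set String)
    (h : ∀ x, x ∉ A → f x = []) :
    (PySem.Set.update A l).flatMap f = A.flatMap f := by
  induction l generalizing A with
  | nil => rfl
  | cons t tl ih =>
    have step : (PySem.Set.add A t).flatMap f = A.flatMap f := by
      by_cases hm : t ∈ A
      · simp [PySem.Set.add, hm]
      · simp [PySem.Set.add, hm, h t hm]
    have h' : ∀ x, x ∉ PySem.Set.add A t → f x = [] := by
      intro x hx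
      exact h x (fun hm => hx ((PySem.Set.mem_add A t x).mpr (Or.inl hm)))
    calc (PySem.Set.update A (t :: tl)).flatMap f
        = (PySem.Set.update (PySem.Set.add A t) tl).flatMap f := rfl
      _ = (PySem.Set.add A t).flatMap f := ih _ h'
      _ = A.flatMap f := step

-- the merge of two SORTED lists leaves exactly the truncated count differences
theorem pvMerge_count (hs : List String) : ∀ (ss : List String),
    hs.Pairwise (· ≤ ·) → ss.Pairwise (· ≤ ·) → ∀ k : String,
    (pvMerge hs ss).1.count k = hs.count k - ss.count k
    ∧ (pvMerge hs ss).2.count k = ss.count k - hs.count k := by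
  induction hs with
  | nil =>
    intro ss _ _ k
    simp [pvMerge]
  | cons h hs ihh =>
    intro ss
    induction ss with
    | nil =>
      intro _ _ k
      simp [pvMerge]
    | cons s ss ihs =>
      intro Hh Hs k
      rw [List.pairwise_cons] at Hh Hs
      by_cases he : h = s
      · have hm : pvMerge (h :: hs) (s :: ss) = pvMerge hs ss := by
          simp [pvMerge, he]
        rcases ihh ss Hh.2 Hs.2 k with ⟨i1, i2⟩
        constructor
        · rw [hm, i1, he]
          simp only [List.count_cons]
          split_ifs <;> omega
        · rw [hm, i2, he]
          simp only [List.count_cons]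
          split_ifs <;> omega
      · by_cases hlt : h < s
        · rcases ihh (s :: ss) Hh.2 (List.pairwise_cons.mpr Hs) k with ⟨i1, i2⟩
          have hzero : (s :: ss).count h = 0 := by
            apply List.count_eq_zero.mpr
            intro hmem
            rcases List.mem_cons.mp hmem with rfl | hmem
            · exact he rfl
            · exact absurd (Hs.1 _ hmem) (not_le.mpr hlt)
          constructor
          · simp only [pvMerge, if_neg he, if_pos hlt]
            rw [List.count_cons, i1]
            by_cases hk : k = h
            · subst hk
              simp only [hzero]
              simp
            · simp [List.count_cons, Ne.symm hk]
          · simp only [pvMerge, if_neg he, if_pos hlt]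
            rw [i2]
            by_cases hk : k = h
            · subst hk
              simp [hzero]
            · simp [List.count_cons, Ne.symm hk]
        · rcases ihs (List.pairwise_cons.mpr Hh) Hs.2 k with ⟨i1, i2⟩
          have hslt : s < h := by
            rcases lt_trichotomy h s with h1 | h1 | h1
            · exact absurd h1 hlt
            · exact absurd h1 he
            · exact h1
          have hzero : (h :: hs).count s = 0 := by
            apply List.count_eq_zero.mpr
            intro hmem
            rcases List.mem_cons.mp hmem with rfl | hmem
            · exact he rfl
            · exact absurd (Hh.1 _ hmem) (not_le.mpr hslt)
          constructor
          · simp only [pvMerge, if_neg he, if_neg hlt]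
            rw [i1]
            by_cases hk : k = s
            · subst hk
              simp [hzero]
            · simp [List.count_cons, Ne.symm hk]
          · simp only [pvMerge, if_neg he, if_neg hlt]
            rw [List.count_cons, i2]
            by_cases hk : k = s
            · subst hk
              simp only [hzero]
              simp
            · simp [List.count_cons, Ne.symm hk]

-- the two per-key leftover forms agree: A's Int surplus vs B's Nat count difference
theorem pvFn_eq' (k : String) (a b : Nat) :
    (if 0 < max 0 ((a : Int) - b) then List.replicate (max 0 ((a : Int) - b)).natAbs k else [])
    = List.replicate (a - b) k := by
  by_cases hc : 0 < (a : Int) - b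
  · rw [if_pos (by omega)]
    congr 1
    omega
  · rw [if_neg (by omega)]
    have : a - b = 0 := by omega
    rw [this]
    rfl

theorem pvMain (h s : List String) : exact_match h s = exact_match_alt h s := by
  have hd0 : h.foldl (fun d t => d.modify t 0 (· + 1)) PySem.Dict.empty = PySem.Dict.counter h := rfl
  have H : ∀ j, 0 ≤ (PySem.Dict.counter h).getD j 0 := by
    intro j; rw [PySem.Dict.getD_counter]; positivity
  -- street fold facts
  have gA : ∀ k, (s.foldl pvStreetStep (PySem.Dict.counter h, PySem.Dict.empty)).1.getD k 0
      = max 0 ((h.count k : Int) - s.count k) := by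
    intro k
    have := (pvStreetFold_getD s (PySem.Dict.counter h) PySem.Dict.empty H k).1
    rwa [PySem.Dict.getD_counter] at this
  have gB : ∀ k, (s.foldl pvStreetStep (PySem.Dict.counter h, PySem.Dict.empty)).2.getD k 0
      = max 0 ((s.count k : Int) - h.count k) := by
    intro k
    have := (pvStreetFold_getD s (PySem.Dict.counter h) PySem.Dict.empty H k).2
    rwa [PySem.Dict.getD_counter, PySem.Dict.getD_empty, zero_add] at this
  have kA : (s.foldl pvStreetStep (PySem.Dict.counter h, PySem.Dict.empty)).1.keys
      = PySem.Set.update (PySem.Set.ofList h) s := by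
    have := (pvStreetFold_keys s (PySem.Dict.counter h) PySem.Dict.empty).1
    rwa [PySem.Dict.keys_counter] at this
  have kB : (s.foldl pvStreetStep (PySem.Dict.counter h, PySem.Dict.empty)).2.keys
      = PySem.Set.ofList s := by
    have := (pvStreetFold_keys s (PySem.Dict.counter h) PySem.Dict.empty).2
    rwa [PySem.Dict.keys_empty] at this
  have ndA : (s.foldl pvStreetStep (PySem.Dict.counter h, PySem.Dict.empty)).1.keys.Nodup := by
    rw [kA]; exact PySem.Set.nodup_update _ _ (PySem.Set.nodup_ofList h)
  have ndB : (s.foldl pvStreetStep (PySem.Dict.counter h, PySem.Dict.empty)).2.keys.Nodup := by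
    rw [kB]; exact PySem.Set.nodup_ofList s
  -- B's merge facts: counts of the sorted copies are the original counts
  have hcs : ∀ k, (PySem.List.sorted h (fun x => x)).count k = h.count k := by
    intro k; exact (PySem.List.sorted_perm h (fun x => x) false).count_eq k
  have scs : ∀ k, (PySem.List.sorted s (fun x => x)).count k = s.count k := by
    intro k; exact (PySem.List.sorted_perm s (fun x => x) false).count_eq k
  have hsp : (PySem.List.sorted h (fun x => x)).Pairwise (· ≤ ·) :=
    PySem.List.sorted_pairwise h (fun x => x)
  have ssp : (PySem.List.sorted s (fun x => x)).Pairwise (· ≤ ·) :=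
    PySem.List.sorted_pairwise s (fun x => x)
  have mc := pvMerge_count (PySem.List.sorted h (fun x => x)) (PySem.List.sorted s (fun x => x)) hsp ssp
  have mc1 : ∀ k, (pvMerge (PySem.List.sorted h (fun x => x)) (PySem.List.sorted s (fun x => x))).1.count k
      = h.count k - s.count k := by
    intro k; rw [(mc k).1, hcs, scs]
  have mc2 : ∀ k, (pvMerge (PySem.List.sorted h (fun x => x)) (PySem.List.sorted s (fun x => x))).2.count k
      = s.count k - h.count k := by
    intro k; rw [(mc k).2, hcs, scs]
  -- A's first output loop produces exactly B's new_house_list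
  have c1 : (s.foldl pvStreetStep (PySem.Dict.counter h, PySem.Dict.empty)).1.items.flatMap
        (fun kv => if 0 < kv.2 then List.replicate kv.2.natAbs kv.1 else [])
      = (PySem.List.dedup h).flatMap (fun k => List.replicate
          (((pvMerge (PySem.List.sorted h (fun x => x)) (PySem.List.sorted s (fun x => x))).1.foldl
            (fun d t => d.insert t (d.getD t 0 + 1)) (PySem.Dict.empty : PySem.Dict String Int)).getD k 0).toNat k) := by
    rw [PySem.Dict.items_eq_map_keys _ ndA 0, List.flatMap_map, kA]
    have hfun : (fun k => if 0 < (s.foldl pvStreetStep (PySem.Dict.counter h, PySem.Dict.empty)).1.getD k 0 then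
          List.replicate ((s.foldl pvStreetStep (PySem.Dict.counter h, PySem.Dict.empty)).1.getD k 0).natAbs k else [])
        = (fun k => List.replicate (h.count k - s.count k) k) := by
      funext k; rw [gA k]; exact pvFn_eq' k _ _
    simp only [hfun]
    rw [pvFlatMap_update _ s (PySem.Set.ofList h) ?_]
    · rw [PySem.List.dedup_eq_ofList]
      apply List.flatMap_congr
      intro k _
      simp [PySem.Dict.getD_foldl_insert_add_one, mc1 k]
    · intro x hx
      have : x ∉ h := fun hm => hx ((PySem.Set.mem_ofList h x).mpr hm)
      have hcnt : h.count x = 0 := List.count_eq_zero.mpr this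
      simp [hcnt]
  -- A's second output loop produces exactly B's new_trade_list
  have c2 : (s.foldl pvStreetStep (PySem.Dict.counter h, PySem.Dict.empty)).2.items.flatMap
        (fun kv => if 0 < kv.2 then List.replicate kv.2.natAbs kv.1 else [])
      = (PySem.List.dedup s).flatMap (fun k => List.replicate
          (((pvMerge (PySem.List.sorted h (fun x => x)) (PySem.List.sorted s (fun x => x))).2.foldl
            (fun d t => d.insert t (d.getD t 0 + 1)) (PySem.Dict.empty : PySem.Dict String Int)).getD k 0).toNat k) := by
    rw [PySem.Dict.items_eq_map_keys _ ndB 0, List.flatMap_map, kB]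
    have hfun : (fun k => if 0 < (s.foldl pvStreetStep (PySem.Dict.counter h, PySem.Dict.empty)).2.getD k 0 then
          List.replicate ((s.foldl pvStreetStep (PySem.Dict.counter h, PySem.Dict.empty)).2.getD k 0).natAbs k else [])
        = (fun k => List.replicate (s.count k - h.count k) k) := by
      funext k; rw [gB k]; exact pvFn_eq' k _ _
    simp only [hfun]
    rw [PySem.List.dedup_eq_ofList]
    apply List.flatMap_congr
    intro k _
    simp [PySem.Dict.getD_foldl_insert_add_one, mc2 k]
  -- assemble
  show (let house_dict := h.foldl (fun d t => d.modify t 0 (· + 1)) PySem.Dict.empty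
        let st := s.foldl pvStreetStep (house_dict, PySem.Dict.empty)
        let p1 := st.1.items.foldl pvOutStep ([], [])
        let p2 := st.2.items.foldl pvOutStep (p1.1, [])
        (PySem.List.sorted p2.1 (fun x => x), p1.2, p2.2)) = _
  rw [hd0]
  simp only [pvOutFold, List.nil_append, pvContrib]
  unfold exact_match_alt
  rw [c1, c2]

-- ===== VERDICT (by name: the statement is the Claim_ definition above) =====
theorem exact_match_spec : Claim_equal_exact_match := by
  intro h s _
  exact pvMain h s
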